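-- pv_equiv track=rewrite | github.com/CLAIRE-Labo/EvoTune | src/packing/evaluate/graph_error_correcting_codes/all_codes_annoy.py | construct_graph
-- ===== SOURCE A (Python) =====
-- def hamming_distance(s1, s2):
--     """Calculates the Hamming distance between two equal-length binary strings."""
--     return sum(c1 != c2 for c1, c2 in zip(s1, s2))
--
-- def edges_to_adjacency_list(edges, total_nodes):
--     """
--     Constructs Graph as a dictionary of the following format-
--
--     graph[VertexNumber V] = list[Neighbors of Vertex V]
--     """
--     graph = {i: [] for i in total_nodes}
--
--     for i in range(len(edges)):
--         v1, v2 = edges[i]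
--
--         graph[v1].append(v2)
--         graph[v2].append(v1)
--     return graph
--
-- def construct_graph(vertices, max_distance):
--     """ Constructs a graph based on Hamming distance criteria. """
--     edges = []
--     for i in range(len(vertices)):
--         for j in range(i + 1, len(vertices)):
--             # WARNING: Here be careful if < or <= is used!
--             if hamming_distance(vertices[i], vertices[j]) < max_distance:
--                 edges.append((vertices[i], vertices[j]))
--
--     graph = edges_to_adjacency_list(edges,vertices)
--     return graph,edges
-- ===== SOURCE B (Python) =====
-- def hamming_distance(s1, s2):
--     """Calculates the Hamming distance between two equal-length binary strings."""
--     return sum(c1 != c2 for c1, c2 in zip(s1, s2))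
--
-- def construct_graph(vertices, max_distance):
--     """Constructs a graph based on Hamming distance criteria.
--
--     Edges are produced by head/tail iteration (no index arithmetic); each
--     adjacency row is read off the edge list by a per-vertex comprehension
--     instead of being accumulated by mutation."""
--     edges = []
--     vs = vertices
--     while vs:
--         v, vs = vs[0], vs[1:]
--         edges += [(v, w) for w in vs if hamming_distance(v, w) < max_distance]
--     graph = {v: [x for (u, w) in edges
--                  for x in ([w] if u == v else []) + ([u] if w == v else [])]
--              for v in vertices}
--     return graph, edges
-- ===== Notes on version B (the rewrite author's own statement) =====
-- stated objective: alternative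
-- what changed: B builds the edge list by head/tail iteration with comprehensions (no index arithmetic) and computes each adjacency row directly as a per-vertex comprehension over the edge list, instead of A's indexed double loop followed by mutating appends into a dict keyed by edge endpoints.
import Mathlib
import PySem

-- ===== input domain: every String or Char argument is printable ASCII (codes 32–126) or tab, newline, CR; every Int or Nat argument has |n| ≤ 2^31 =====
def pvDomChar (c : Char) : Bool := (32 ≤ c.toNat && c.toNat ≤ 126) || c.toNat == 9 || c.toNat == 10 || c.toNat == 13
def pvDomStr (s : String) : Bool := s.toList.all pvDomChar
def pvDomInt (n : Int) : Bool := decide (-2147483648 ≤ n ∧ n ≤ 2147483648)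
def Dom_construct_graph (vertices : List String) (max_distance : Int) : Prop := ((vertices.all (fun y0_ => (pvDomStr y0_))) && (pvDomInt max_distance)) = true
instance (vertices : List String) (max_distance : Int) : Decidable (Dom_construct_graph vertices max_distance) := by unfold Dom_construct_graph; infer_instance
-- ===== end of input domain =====

-- B builds edges by head/tail iteration and each adjacency row as a per-vertex
-- comprehension over the edge list instead of A's indexed loops plus mutating
-- appends into a dict; objective: alternative (trades A's O(V+E) grouping pass
-- for an O(V*E) per-vertex scan of the edge list).

-- ===== PORT A =====
def hamming_distance (s1 s2 : String) : Int :=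
  (s1.toList.zip s2.toList).foldl (fun acc p => acc + (if p.1 ≠ p.2 then 1 else 0)) 0

def edges_to_adjacency_list (edges : List (String × String)) (total_nodes : List String) :
    PySem.Dict String (List String) :=
  let graph := total_nodes.foldl (fun g i => g.insert i []) PySem.Dict.empty
  (PySem.List.pyRange 0 (edges.length : Int) 1).foldl (fun g i =>
    -- v1, v2 = edges[i]; graph[v1].append(v2); graph[v2].append(v1)
    ((g.modify (PySem.List.pyGetD edges i ("", "")).1 [] (· ++ [(PySem.List.pyGetD edges i ("", "")).2])).modify
      (PySem.List.pyGetD edges i ("", "")).2 [] (· ++ [(PySem.List.pyGetD edges i ("", "")).1]))) graph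

def construct_graph (vertices : List String) (max_distance : Int) :
    (List (String × List String)) × (List (String × String)) :=
  let edges := (PySem.List.pyRange 0 (vertices.length : Int) 1).foldl (fun edges i =>
    (PySem.List.pyRange (i + 1) (vertices.length : Int) 1).foldl (fun edges j =>
      if hamming_distance (PySem.List.pyGetD vertices i "") (PySem.List.pyGetD vertices j "") < max_distance
      then edges ++ [(PySem.List.pyGetD vertices i "", PySem.List.pyGetD vertices j "")]
      else edges) edges) []
  let graph := edges_to_adjacency_list edges vertices
  (graph.items, edges)

-- ===== PORT B =====
-- the 'while vs: v, vs = vs[0], vs[1:] …' loop of Source B: structural recursion on the tail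
def edgePairs (max_distance : Int) : List String → List (String × String)
  | [] => []
  | v :: rest =>
      (rest.filter (fun w => decide (hamming_distance v w < max_distance))).map (fun w => (v, w))
        ++ edgePairs max_distance rest

-- the inner 'for x in ([w] if u == v else []) + ([u] if w == v else [])' of Source B's comprehension
def rowOf (v : String) (e : String × String) : List String :=
  (if e.1 == v then [e.2] else []) ++ (if e.2 == v then [e.1] else [])

def construct_graph_alt (vertices : List String) (max_distance : Int) :
    (List (String × List String)) × (List (String × String)) :=
  let edges := edgePairs max_distance vertices
  let graph := vertices.foldl
    (fun g v => g.insert v (edges.flatMap (rowOf v)))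
    (PySem.Dict.empty : PySem.Dict String (List String))
  (graph.items, edges)

-- ===== PRECONDITION & SPEC =====
def Spec_construct_graph (vertices : List String) (max_distance : Int) (out : (List (String × List String)) × (List (String × String))) : Prop := out = construct_graph_alt vertices max_distance
instance (vertices : List String) (max_distance : Int) (out : (List (String × List String)) × (List (String × String))) : Decidable (Spec_construct_graph vertices max_distance out) := by unfold Spec_construct_graph; infer_instance

-- ===== CLAIM (what is proved, stated in full; the proofs are below) =====
def Claim_equal_construct_graph : Prop := ∀ (vertices : List String) (max_distance : Int), Dom_construct_graph vertices max_distance → Spec_construct_graph vertices max_distance (construct_graph vertices max_distance)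

-- ===== LEMMAS AND PROOFS =====

-- one 'graph[v1].append(v2); graph[v2].append(v1)' step of A's second pass
def addE (g : PySem.Dict String (List String)) (e : String × String) : PySem.Dict String (List String) :=
  (g.modify e.1 [] (· ++ [e.2])).modify e.2 [] (· ++ [e.1])

-- Nat-indexed form of A's inner-loop contribution for vertex index k
def chunk (vs : List String) (md : Int) (k : Nat) : List (String × String) :=
  ((vs.drop (k+1)).filter (fun w => decide (hamming_distance (vs.getD k "") w < md))).map
    (fun w => (vs.getD k "", w))

lemma flatMap_chunk_eq (md : Int) : ∀ (vs : List String),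
    (List.range vs.length).flatMap (chunk vs md) = edgePairs md vs := by
  intro vs
  induction vs with
  | nil => rfl
  | cons v t ih =>
    have hsh : ∀ k : Nat, chunk (v :: t) md (k+1) = chunk t md k := by
      intro k; simp [chunk]
    calc (List.range (v :: t).length).flatMap (chunk (v :: t) md)
        = chunk (v :: t) md 0 ++ (List.range t.length).flatMap (fun k => chunk (v :: t) md (k+1)) := by
          rw [List.length_cons, List.range_succ_eq_map, List.flatMap_cons, List.flatMap_map]
      _ = edgePairs md (v :: t) := by
          have h2 : (fun k => chunk (v :: t) md (k + 1)) = chunk t md := funext hsh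
          rw [h2, ih]
          simp [chunk, edgePairs]

lemma edgesA_eq (vs : List String) (md : Int) :
    (PySem.List.pyRange 0 (vs.length : Int) 1).foldl (fun edges i =>
      (PySem.List.pyRange (i + 1) (vs.length : Int) 1).foldl (fun edges j =>
        if hamming_distance (PySem.List.pyGetD vs i "") (PySem.List.pyGetD vs j "") < md
        then edges ++ [(PySem.List.pyGetD vs i "", PySem.List.pyGetD vs j "")]
        else edges) edges) [] = edgePairs md vs := by
  have hbody : ∀ (acc : List (String × String)) (i : Int), i ∈ PySem.List.pyRange 0 (vs.length : Int) 1 →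
      (PySem.List.pyRange (i + 1) (vs.length : Int) 1).foldl (fun edges j =>
        if hamming_distance (PySem.List.pyGetD vs i "") (PySem.List.pyGetD vs j "") < md
        then edges ++ [(PySem.List.pyGetD vs i "", PySem.List.pyGetD vs j "")]
        else edges) acc
      = acc ++ chunk vs md i.toNat := by
    intro acc i hi
    have hi' : 0 ≤ i ∧ i < (vs.length : Int) := by
      simpa using (PySem.List.mem_pyRange_one).1 hi
    have h1 : (0:Int) ≤ i + 1 := by omega
    rw [PySem.List.foldl_pyRange_pyGetD' vs ""
          (f := fun acc w => if hamming_distance (PySem.List.pyGetD vs i "") w < md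
            then acc ++ [(PySem.List.pyGetD vs i "", w)] else acc) acc h1]
    have hdrop : (i+1).toNat = i.toNat + 1 := by omega
    have hget : PySem.List.pyGetD vs i "" = vs.getD i.toNat "" := by
      have : i = ((i.toNat : Nat) : Int) := by omega
      rw [this, PySem.List.pyGetD_natCast]
      congr 1
    rw [hdrop, hget]
    exact PySem.List.foldl_append_ite (fun w => hamming_distance (vs.getD i.toNat "") w < md)
      (fun w => (vs.getD i.toNat "", w)) _ _
  rw [PySem.List.foldl_congr_mem _ _ (fun acc i => acc ++ chunk vs md i.toNat) _
        (fun acc x h => hbody acc x h),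
      PySem.List.foldl_append_eq_flatMap]
  rw [PySem.List.pyRange_zero_natCast]
  rw [List.flatMap_map]
  exact flatMap_chunk_eq md vs

lemma mem_edgePairs (md : Int) : ∀ (vs : List String) (e : String × String),
    e ∈ edgePairs md vs → e.1 ∈ vs ∧ e.2 ∈ vs := by
  intro vs
  induction vs with
  | nil => intro e h; simp [edgePairs] at h
  | cons v t ih =>
    intro e h
    simp only [edgePairs, List.mem_append, List.mem_map, List.mem_filter] at h
    rcases h with ⟨w, ⟨hw, _⟩, rfl⟩ | h
    · exact ⟨by simp, by simp [hw]⟩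
    · rcases ih e h with ⟨h1, h2⟩; exact ⟨by simp [h1], by simp [h2]⟩

lemma foldl_addE_eq_flat (E : List (String × String)) :
    ∀ (g : PySem.Dict String (List String)),
    E.foldl addE g =
      (E.flatMap (fun e => [(e.1, e.2), (e.2, e.1)])).foldl
        (fun d p => d.modify p.1 [] (· ++ [p.2])) g := by
  induction E with
  | nil => intro g; rfl
  | cons e t ih =>
    intro g
    simp only [List.foldl_cons, List.flatMap_cons, List.cons_append, List.foldl_append]
    simp only [List.foldl_nil]
    exact ih _

lemma flat_filter_eq_rowOf (k : String) : ∀ (E : List (String × String)),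
    (((E.flatMap (fun e => [(e.1, e.2), (e.2, e.1)])).filter (fun p => p.1 == k)).map (·.2))
      = E.flatMap (rowOf k) := by
  intro E
  induction E with
  | nil => rfl
  | cons e t ih =>
    simp only [List.flatMap_cons, List.filter_append, List.map_append, ih, rowOf]
    congr 1
    by_cases h1 : e.1 == k <;> by_cases h2 : e.2 == k <;> simp [List.filter, h1, h2]

lemma getD_foldl_insertF (F : String → List String) :
    ∀ (vs : List String) (d : PySem.Dict String (List String)) (k : String),
    (vs.foldl (fun g v => g.insert v (F v)) d).getD k []
      = if k ∈ vs then F k else d.getD k [] := by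
  intro vs
  induction vs with
  | nil => intro d k; simp
  | cons v t ih =>
    intro d k
    simp only [List.foldl_cons, ih, PySem.Dict.getD_insert]
    by_cases ht : k ∈ t <;> by_cases hv : k = v <;> simp [ht, hv]

lemma set_update_of_subset : ∀ (l S : List String), (∀ x ∈ l, x ∈ S) →
    PySem.Set.update S l = S := by
  intro l
  induction l with
  | nil => intro S _; rfl
  | cons x t ih =>
    intro S h
    have hx : PySem.Set.add S x = S := by
      simp [PySem.Set.add, PySem.Set.contains, h x (by simp)]
    simp only [PySem.Set.update, List.foldl_cons]
    have := ih S (fun y hy => h y (by simp [hy]))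
    simpa [PySem.Set.update, hx] using this

-- A's second pass is the flat modify fold over doubled edge endpoints
lemma adjacency_eq_flat (E : List (String × String)) (vs : List String) :
    edges_to_adjacency_list E vs =
      (E.flatMap (fun e => [(e.1, e.2), (e.2, e.1)])).foldl
        (fun d p => d.modify p.1 [] (· ++ [p.2]))
        (vs.foldl (fun g v => g.insert v []) PySem.Dict.empty) := by
  rw [← foldl_addE_eq_flat]
  simp only [edges_to_adjacency_list]
  exact PySem.List.foldl_pyRange_zero_pyGetD' E ("", "")
    (f := fun (g : PySem.Dict String (List String)) (e : String × String) =>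
      (g.modify e.1 [] (· ++ [e.2])).modify e.2 [] (· ++ [e.1])) _

lemma adjacency_getD (E : List (String × String)) (vs : List String) (k : String)
    (hk : k ∈ vs) :
    (edges_to_adjacency_list E vs).getD k [] = E.flatMap (rowOf k) := by
  rw [adjacency_eq_flat, PySem.Dict.getD_foldl_modify_append,
      getD_foldl_insertF (fun _ => []) vs PySem.Dict.empty k]
  simp [hk, flat_filter_eq_rowOf]

lemma adjacency_keys (E : List (String × String)) (vs : List String)
    (hE : ∀ e ∈ E, e.1 ∈ vs ∧ e.2 ∈ vs) :
    (edges_to_adjacency_list E vs).keys = PySem.Set.ofList vs := by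
  rw [adjacency_eq_flat,
      PySem.Dict.keys_foldl_modify_key (E.flatMap (fun e => [(e.1, e.2), (e.2, e.1)]))
        (fun p => p.1) [] (fun _ p x => x ++ [p.2])
        (vs.foldl (fun g v => g.insert v []) PySem.Dict.empty),
      PySem.Dict.keys_foldl_insert vs (fun _ _ => []) PySem.Dict.empty]
  have hkeys : (PySem.Dict.empty : PySem.Dict String (List String)).keys = [] := by
    simp [PySem.Dict.keys_empty]
  rw [hkeys]
  have h0 : PySem.Set.update ([] : List String) vs = PySem.Set.ofList vs := by
    rw [PySem.Set.ofList_eq_foldl]; rfl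
  rw [h0]
  apply set_update_of_subset
  intro x hx
  simp only [List.mem_map] at hx
  rcases hx with ⟨p, hp, rfl⟩
  simp only [List.mem_flatMap] at hp
  rcases hp with ⟨e, he, hpe⟩
  rcases hE e he with ⟨h1, h2⟩
  rw [PySem.Set.mem_ofList]
  simp at hpe
  rcases hpe with rfl | rfl
  · exact h1
  · exact h2

lemma adjacency_nodup (E : List (String × String)) (vs : List String) :
    (edges_to_adjacency_list E vs).keys.Nodup := by
  rw [adjacency_eq_flat]
  apply PySem.Dict.nodup_keys_foldl_modify_key
  exact PySem.Dict.nodup_keys_foldl_insert vs (fun _ _ => []) PySem.Dict.empty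
    (by simp)

lemma graphB_keys (vs : List String) (F : String → List String) :
    (vs.foldl (fun g v => g.insert v (F v))
      (PySem.Dict.empty : PySem.Dict String (List String))).keys = PySem.Set.ofList vs := by
  rw [PySem.Dict.keys_foldl_insert vs (fun _ v => F v) PySem.Dict.empty]
  have hkeys : (PySem.Dict.empty : PySem.Dict String (List String)).keys = [] := by
    simp [PySem.Dict.keys_empty]
  rw [hkeys, PySem.Set.ofList_eq_foldl]; rfl

-- ===== VERDICT (by name: the statement is the Claim_ definition above) =====
theorem construct_graph_spec : Claim_equal_construct_graph := by
  intro vertices max_distance _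
  unfold Spec_construct_graph
  simp only [construct_graph, construct_graph_alt]
  rw [edgesA_eq vertices max_distance]
  refine Prod.ext ?_ rfl
  set E := edgePairs max_distance vertices with hE
  set gB := vertices.foldl (fun g v => g.insert v (E.flatMap (rowOf v)))
    (PySem.Dict.empty : PySem.Dict String (List String)) with hgB
  have hnB : gB.keys.Nodup := by
    rw [hgB]
    exact PySem.Dict.nodup_keys_foldl_insert vertices _ PySem.Dict.empty
      (by simp)
  have hkB : gB.keys = PySem.Set.ofList vertices := graphB_keys vertices _
  have hkA : (edges_to_adjacency_list E vertices).keys = PySem.Set.ofList vertices :=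
    adjacency_keys E vertices (fun e he => mem_edgePairs max_distance vertices e he)
  rw [PySem.Dict.items_eq_map_keys _ (adjacency_nodup E vertices) [],
      PySem.Dict.items_eq_map_keys _ hnB [], hkA, hkB]
  apply List.map_congr_left
  intro k hk
  have hkv : k ∈ vertices := (PySem.Set.mem_ofList vertices k).1 hk
  rw [adjacency_getD E vertices k hkv, hgB,
      getD_foldl_insertF (fun v => E.flatMap (rowOf v)) vertices PySem.Dict.empty k]
  simp [hkv]
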